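-- pv_equiv track=rewrite | github.com/svend4/infom | signatures/hexsig.py | delaunay_graph
-- ===== SOURCE A (Python) =====
-- N_DIMS    = 6     # размерность
--
-- N_NODES   = 64    # 2^6 вершин
--
-- def hamming(a: int, b: int) -> int:
--     return bin(a ^ b).count('1')
--
-- def neighbors(h: int) -> list[int]:
--     return [h ^ (1 << i) for i in range(N_DIMS)]
--
-- def voronoi_cells(centers: list[int]) -> dict[int, list[int]]:
--     """Разбивка Q6 на ячейки Voronoi по набору центров."""
--     cells: dict[int, list[int]] = {c: [] for c in centers}
--     for h in range(N_NODES):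
--         nearest = min(centers, key=lambda c: hamming(h, c))
--         cells[nearest].append(h)
--     return cells
--
-- def delaunay_graph(centers: list[int]) -> list[tuple[int, int]]:
--     """Граф Делоне: два центра связаны если их ячейки Voronoi граничат."""
--     cells = voronoi_cells(centers)
--     edges = set()
--     for c1 in centers:
--         for node in cells[c1]:
--             for nb in neighbors(node):
--                 for c2 in centers:
--                     if c2 != c1 and nb in cells[c2]:
--                         edge = (min(c1,c2), max(c1,c2))
--                         edges.add(edge)
--     return list(edges)
-- ===== SOURCE B (Python) =====
-- N_DIMS = 6
-- N_NODES = 64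
--
-- def delaunay_graph(centers):
--     # One fused pass over the nodes of Q6 in increasing order: compute each node's
--     # nearest center with an explicit running-minimum scan (strict '<' keeps the
--     # first center on ties, like min()), record it, and immediately compare it with
--     # the owners of the node's already-visited lower neighbours (the set bits of h),
--     # so every hypercube edge is examined exactly once and no separate staged
--     # owner-table / edge-scan phases exist.
--     owner = {}
--     edges = set()
--     for h in range(N_NODES):
--         best = None
--         best_d = 0
--         for c in centers:
--             d = bin(h ^ c).count('1')
--             if best is None or d < best_d:
--                 best, best_d = c, d
--         owner[h] = best
--         for i in range(N_DIMS):
--             if h & (1 << i):          # lower neighbour h - 2^i was already processed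
--                 o2 = owner[h ^ (1 << i)]
--                 if o2 != best:
--                     edges.add((best, o2) if best < o2 else (o2, best))
--     return list(edges)
-- ===== Notes on version B (the rewrite author's own statement) =====
-- stated objective: faster
-- what changed: B is one fused pass over the 64 nodes in increasing order: the nearest center is found by an explicit running-minimum scan (no min()/key), recorded, and immediately compared against the owners of the node's already-visited lower neighbours (the set bits of h), so each of the 192 cube edges is examined exactly once and A's four nested center/cell/neighbor/center loops with list-membership scans disappear.
import Mathlib
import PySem

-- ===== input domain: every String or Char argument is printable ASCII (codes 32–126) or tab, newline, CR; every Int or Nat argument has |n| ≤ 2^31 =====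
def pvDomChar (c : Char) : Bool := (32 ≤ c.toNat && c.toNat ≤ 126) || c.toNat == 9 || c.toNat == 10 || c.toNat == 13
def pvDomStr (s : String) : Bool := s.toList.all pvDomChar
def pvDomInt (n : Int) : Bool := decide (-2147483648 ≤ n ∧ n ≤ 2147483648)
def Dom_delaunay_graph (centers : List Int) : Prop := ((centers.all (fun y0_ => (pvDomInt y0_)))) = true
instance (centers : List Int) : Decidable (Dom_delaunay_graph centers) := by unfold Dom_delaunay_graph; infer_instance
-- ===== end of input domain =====

-- B replaces A's four nested center/cell/neighbor/center loops by ONE fused pass over the 64 nodes in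
-- increasing order: a running-minimum scan finds the node's nearest center, which is immediately compared
-- with the owners of the node's already-visited lower neighbours, so each cube edge is examined once.
-- Both Pythons return list(set(...)), whose hash order is not modelled: both ports return the canonical
-- sorted listing of the same set of pairs (the output is compared as a set).

-- ===== PORT A =====
-- hamming a b = bin(a ^ b).count('1')  (Python-exact on negatives: bin shows '-' plus |a^b|, so it counts bits of |a^b|)
def hammingA (a b : Int) : Int := (PySem.Int.bitCount (PySem.Int.bxor a b) : Int)

-- neighbors h = [h ^ (1 << i) for i in range(6)]  (i ≥ 0 here, so Int.shiftLeft 1 i.toNat is Python's 1 << i)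
def neighborsA (h : Int) : List Int :=
  (PySem.List.pyRange 0 6 1).map (fun i => PySem.Int.bxor h (Int.shiftLeft 1 i.toNat))

-- voronoi_cells: {c: [] for c in centers}, then for each h in range(64) append h to cells[min(centers, key=...)].
-- min(...) raises ValueError only for centers = [] (outside Pre_), so .getD 0 is never taken;
-- cells[nearest].append(h) is modify with default [] (the key is always present).
def voronoi_cells (centers : List Int) : PySem.Dict Int (List Int) :=
  let cells := centers.foldl (fun d c => d.insert c ([] : List Int)) PySem.Dict.empty
  (PySem.List.pyRange 0 64 1).foldl
    (fun d h => d.modify ((PySem.List.min? centers (fun c => hammingA h c)).getD 0) [] (fun l => l ++ [h]))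
    cells

-- the four nested loops building the edge set, innermost first (helpers keep the fold steps nameable)
def stepA4 (cells : PySem.Dict Int (List Int)) (c1 nb : Int)
    (s : PySem.Set (Int × Int)) (c2 : Int) : PySem.Set (Int × Int) :=
  if c2 ≠ c1 ∧ nb ∈ cells.getD c2 [] then PySem.Set.add s (min c1 c2, max c1 c2) else s

def stepA3 (centers : List Int) (cells : PySem.Dict Int (List Int)) (c1 : Int)
    (s : PySem.Set (Int × Int)) (node : Int) : PySem.Set (Int × Int) :=
  (neighborsA node).foldl (fun s nb => centers.foldl (stepA4 cells c1 nb) s) s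

def edgesA (centers : List Int) : PySem.Set (Int × Int) :=
  centers.foldl
    (fun s c1 => ((voronoi_cells centers).getD c1 []).foldl (stepA3 centers (voronoi_cells centers) c1) s)
    PySem.Set.empty

-- return list(edges): Python's set order is hash order (not modelled); canonical sorted listing, output compared as a set
def delaunay_graph (centers : List Int) : List (Int × Int) :=
  PySem.List.sorted2 (edgesA centers) (fun p => p.1) (fun p => p.2) false

-- ===== PORT B =====
-- the running-minimum scan: best = None; best_d = 0; for c in centers: d = bin(h^c).count('1');
-- if best is None or d < best_d: best, best_d = c, d
def bestOf (centers : List Int) (h : Int) : Option Int × Int :=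
  centers.foldl
    (fun acc c =>
      let d : Int := (PySem.Int.bitCount (PySem.Int.bxor h c) : Int)
      if acc.1 = none ∨ d < acc.2 then (some c, d) else acc)
    (none, 0)

-- (best, o2) if best < o2 else (o2, best): Python compares ints here; whenever this runs without Python
-- raising, both options are some, so the .getD 0 defaults are never taken
def pairOf (a b : Option Int) : Int × Int :=
  if a.getD 0 < b.getD 0 then (a.getD 0, b.getD 0) else (b.getD 0, a.getD 0)

-- inner loop over the 6 dimensions: if h & (1 << i): o2 = owner[h ^ (1 << i)] (key always present:
-- the lower neighbour was processed earlier, so getD's none default is never taken); add the ordered pair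
def dimStep (best : Option Int) (owner : PySem.Dict Int (Option Int)) (h : Int)
    (es : PySem.Set (Int × Int)) (i : Int) : PySem.Set (Int × Int) :=
  if PySem.Int.band h (Int.shiftLeft 1 i.toNat) ≠ 0 then
    let o2 := owner.getD (PySem.Int.bxor h (Int.shiftLeft 1 i.toNat)) none
    if o2 ≠ best then PySem.Set.add es (pairOf best o2) else es
  else es

-- body of the single pass for one node h: find its owner, record it, scan its set bits
def nodeStep (centers : List Int)
    (st : PySem.Dict Int (Option Int) × PySem.Set (Int × Int)) (h : Int) :
    PySem.Dict Int (Option Int) × PySem.Set (Int × Int) :=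
  let best := (bestOf centers h).1
  let owner := st.1.insert h best
  (owner, (PySem.List.pyRange 0 6 1).foldl (dimStep best owner h) st.2)

def edgesB (centers : List Int) : PySem.Set (Int × Int) :=
  ((PySem.List.pyRange 0 64 1).foldl (nodeStep centers) (PySem.Dict.empty, PySem.Set.empty)).2

-- return list(edges): same canonical sorted listing as the A port
def delaunay_graph_alt (centers : List Int) : List (Int × Int) :=
  PySem.List.sorted2 (edgesB centers) (fun p => p.1) (fun p => p.2) false

-- ===== PRECONDITION & SPEC =====
-- min(centers, ...) raises ValueError on an empty list
def Pre_delaunay_graph (centers : List Int) : Prop := centers ≠ []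
instance (centers : List Int) : Decidable (Pre_delaunay_graph centers) := by unfold Pre_delaunay_graph; infer_instance
def pvWitness_delaunay_graph : List Int := ([3, 60])

def Spec_delaunay_graph (centers : List Int) (out : List (Int × Int)) : Prop := out = delaunay_graph_alt centers
instance (centers : List Int) (out : List (Int × Int)) : Decidable (Spec_delaunay_graph centers out) := by unfold Spec_delaunay_graph; infer_instance

-- ===== CLAIM (what is proved, stated in full; the proofs are below) =====
def Claim_equal_delaunay_graph : Prop := ∀ (centers : List Int), Dom_delaunay_graph centers → Pre_delaunay_graph centers → Spec_delaunay_graph centers (delaunay_graph centers)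


-- ===== LEMMAS AND PROOFS =====

-- the nearest center of node h (what both ports compute)
def nst (centers : List Int) (h : Int) : Int :=
  (PySem.List.min? centers (fun c => hammingA h c)).getD 0

-- the lower/upper neighbour of h across dimension i, and the ordered pair both programs add
def nbOf (h i : Int) : Int := PySem.Int.bxor h (Int.shiftLeft 1 i.toNat)

def pr (a b : Int) : Int × Int := if a < b then (a, b) else (b, a)

theorem pr_minmax (a b : Int) : pr a b = (min a b, max a b) := by
  unfold pr
  split_ifs with h <;> refine Prod.ext ?_ ?_ <;> simp [min_def, max_def] <;> omega

theorem pr_comm (a b : Int) : pr a b = pr b a := by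
  rw [pr_minmax, pr_minmax, min_comm, max_comm]

theorem shift_eq (i : Int) : Int.shiftLeft 1 i.toNat = ((2 ^ i.toNat : Nat) : Int) := by
  unfold Int.shiftLeft
  simp [Nat.shiftLeft_eq]

theorem nst_mem {centers : List Int} (hne : centers ≠ []) (h : Int) : nst centers h ∈ centers := by
  unfold nst
  cases hm : PySem.List.min? centers (fun c => hammingA h c) with
  | none => exact absurd ((PySem.List.min?_eq_none_iff _ _).mp hm) hne
  | some m => simpa using PySem.List.min?_mem hm

theorem min?_eq_some_nst {centers : List Int} (hne : centers ≠ []) (h : Int) :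
    PySem.List.min? centers (fun c => hammingA h c) = some (nst centers h) := by
  cases hm : PySem.List.min? centers (fun c => hammingA h c) with
  | none => exact absurd ((PySem.List.min?_eq_none_iff _ _).mp hm) hne
  | some m => unfold nst; rw [hm]; rfl

-- B's running-minimum scan computes exactly min(centers, key=...): strict '<' keeps the first minimum
def mstep (h : Int) (acc : Option Int) (x : Int) : Option Int :=
  acc.elim (some x)
    (fun m => if (PySem.Int.bitCount (PySem.Int.bxor h x) : Int)
        < (PySem.Int.bitCount (PySem.Int.bxor h m) : Int) then some x else some m)

theorem min?_eq_fold_mstep (centers : List Int) (h : Int) :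
    PySem.List.min? centers (fun c => hammingA h c) = centers.foldl (mstep h) none := by
  unfold PySem.List.min?
  refine List.foldl_ext _ _ none (fun acc c _ => ?_)
  cases acc <;> rfl

theorem bestOf_eq (centers : List Int) (h : Int) :
    (bestOf centers h).1 = PySem.List.min? centers (fun c => hammingA h c) := by
  rw [min?_eq_fold_mstep]
  have aux : ∀ (l : List Int) (m : Int),
      (l.foldl
        (fun acc c =>
          if acc.1 = none ∨ ((PySem.Int.bitCount (PySem.Int.bxor h c) : Int)) < acc.2
          then (some c, (PySem.Int.bitCount (PySem.Int.bxor h c) : Int)) else acc)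
        (some m, (PySem.Int.bitCount (PySem.Int.bxor h m) : Int))).1
      = l.foldl (mstep h) (some m) := by
    intro l
    induction l with
    | nil => intro m; rfl
    | cons c t ih =>
      intro m
      simp only [List.foldl_cons]
      by_cases hlt : ((PySem.Int.bitCount (PySem.Int.bxor h c) : Int))
          < ((PySem.Int.bitCount (PySem.Int.bxor h m) : Int))
      · rw [if_pos (Or.inr hlt)]
        have : mstep h (some m) c = some c := by simp only [mstep, Option.elim]; rw [if_pos hlt]
        rw [this]
        exact ih c
      · have hcond : ¬ (((some m, (PySem.Int.bitCount (PySem.Int.bxor h m) : Int)) :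
            Option Int × Int).1 = none ∨
            ((PySem.Int.bitCount (PySem.Int.bxor h c) : Int)) <
              ((some m, (PySem.Int.bitCount (PySem.Int.bxor h m) : Int)) : Option Int × Int).2) := by
          rintro (hnone | hlt2)
          · simp at hnone
          · exact hlt hlt2
        have : mstep h (some m) c = some m := by simp only [mstep, Option.elim]; rw [if_neg hlt]
        rw [if_neg hcond, this]
        exact ih m
  unfold bestOf
  cases centers with
  | nil => rfl
  | cons c t =>
    simp only [List.foldl_cons, true_or, if_true]
    have : mstep h none c = some c := rfl
    rw [this]
    exact aux t c

theorem bestOf_eq_nst {centers : List Int} (hne : centers ≠ []) (h : Int) :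
    (bestOf centers h).1 = some (nst centers h) := by
  rw [bestOf_eq]
  exact min?_eq_some_nst hne h

-- membership through a foldl whose step only adds elements described by Q
theorem mem_foldl_iff {α β : Type} (F : List β → α → List β) (Q : α → β → Prop)
    (hF : ∀ s a x, x ∈ F s a ↔ x ∈ s ∨ Q a x) :
    ∀ (l : List α) (s : List β) (x : β), x ∈ l.foldl F s ↔ x ∈ s ∨ ∃ a ∈ l, Q a x := by
  intro l
  induction l with
  | nil => simp
  | cons a t ih =>
    intro s x
    simp only [List.foldl_cons, ih, hF, List.mem_cons]
    constructor
    · rintro ((h | h) | ⟨b, hb, hq⟩)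
      · exact Or.inl h
      · exact Or.inr ⟨a, Or.inl rfl, h⟩
      · exact Or.inr ⟨b, Or.inr hb, hq⟩
    · rintro (h | ⟨b, (rfl | hb), hq⟩)
      · exact Or.inl (Or.inl h)
      · exact Or.inl (Or.inr hq)
      · exact Or.inr ⟨b, hb, hq⟩

theorem nodup_foldl {α β : Type} (F : List β → α → List β)
    (hF : ∀ s a, s.Nodup → (F s a).Nodup) :
    ∀ (l : List α) (s : List β), s.Nodup → (l.foldl F s).Nodup := by
  intro l
  induction l with
  | nil => intro s hs; simpa using hs
  | cons a t ih => intro s hs; exact ih _ (hF s a hs)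

-- the initial dict {c: [] for c in centers} maps every key to []
theorem getD_init (l : List Int) :
    ∀ (d : PySem.Dict Int (List Int)), (∀ c, d.getD c [] = []) →
      ∀ c, (l.foldl (fun d c => d.insert c ([] : List Int)) d).getD c [] = [] := by
  induction l with
  | nil => intro d hd c; exact hd c
  | cons a t ih =>
    intro d hd c
    refine ih _ (fun c' => ?_) c
    rw [PySem.Dict.getD_insert]
    split
    · rfl
    · exact hd c'

-- characterisation of A's Voronoi cells: x ∈ cells[c] iff x ∈ range(64) and its nearest center is c
theorem mem_cells (centers : List Int) (c x : Int) :
    x ∈ (voronoi_cells centers).getD c [] ↔ x ∈ PySem.List.pyRange 0 64 1 ∧ nst centers x = c := by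
  unfold voronoi_cells
  have hmap :
      (PySem.List.pyRange 0 64 1).foldl
        (fun d h => d.modify ((PySem.List.min? centers (fun c => hammingA h c)).getD 0) [] (fun l => l ++ [h]))
        (centers.foldl (fun d c => d.insert c ([] : List Int)) PySem.Dict.empty)
      = ((PySem.List.pyRange 0 64 1).map (fun h => (nst centers h, h))).foldl
          (fun d p => d.modify p.1 [] (fun l => l ++ [p.2]))
          (centers.foldl (fun d c => d.insert c ([] : List Int)) PySem.Dict.empty) := by
    rw [List.foldl_map]
    rfl
  rw [hmap, PySem.Dict.getD_foldl_modify_append,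
      getD_init centers PySem.Dict.empty (fun c => by simp [PySem.Dict.getD_empty])]
  simp only [List.nil_append, List.mem_map, List.mem_filter]
  constructor
  · rintro ⟨a, ⟨⟨h', hh', rfl⟩, hk⟩, hx2⟩
    simp only at hx2
    subst hx2
    exact ⟨hh', by simpa using hk⟩
  · rintro ⟨hx, hc⟩
    exact ⟨(c, x), ⟨⟨x, hx, by rw [hc]⟩, by simp⟩, rfl⟩

-- membership in A's edge set (stated for an abstract cells dict so if-conditions stay symbolic)
theorem mem_edgesA_gen (centers : List Int) (cells : PySem.Dict Int (List Int)) (x : Int × Int) :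
    x ∈ centers.foldl
          (fun s c1 => (cells.getD c1 []).foldl (stepA3 centers cells c1) s) PySem.Set.empty ↔
      ∃ c1 ∈ centers, ∃ node ∈ cells.getD c1 [],
        ∃ nb ∈ neighborsA node, ∃ c2 ∈ centers,
          (c2 ≠ c1 ∧ nb ∈ cells.getD c2 []) ∧ x = (min c1 c2, max c1 c2) := by
  have h4 : ∀ c1 nb (s : PySem.Set (Int × Int)) x,
      x ∈ centers.foldl (stepA4 cells c1 nb) s ↔
        x ∈ s ∨ ∃ c2 ∈ centers,
          (c2 ≠ c1 ∧ nb ∈ cells.getD c2 []) ∧ x = (min c1 c2, max c1 c2) := by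
    intro c1 nb
    refine mem_foldl_iff _ _ (fun s c2 x => ?_) centers
    unfold stepA4
    by_cases hc : c2 ≠ c1 ∧ nb ∈ cells.getD c2 []
    · rw [if_pos hc, PySem.Set.mem_add]
      tauto
    · rw [if_neg hc]
      tauto
  have h3 : ∀ c1 node (s : PySem.Set (Int × Int)) x,
      x ∈ stepA3 centers cells c1 s node ↔
        x ∈ s ∨ ∃ nb ∈ neighborsA node, ∃ c2 ∈ centers,
          (c2 ≠ c1 ∧ nb ∈ cells.getD c2 []) ∧ x = (min c1 c2, max c1 c2) := by
    intro c1 node s x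
    unfold stepA3
    exact mem_foldl_iff _ _ (fun s nb x => h4 c1 nb s x) (neighborsA node) s x
  have h2 : ∀ c1 (s : PySem.Set (Int × Int)) x,
      x ∈ (cells.getD c1 []).foldl (stepA3 centers cells c1) s ↔
        x ∈ s ∨ ∃ node ∈ cells.getD c1 [],
          ∃ nb ∈ neighborsA node, ∃ c2 ∈ centers,
            (c2 ≠ c1 ∧ nb ∈ cells.getD c2 []) ∧ x = (min c1 c2, max c1 c2) := by
    intro c1 s x
    exact mem_foldl_iff _ _ (fun s node x => h3 c1 node s x) _ s x
  have h1 := mem_foldl_iff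
    (fun s c1 => (cells.getD c1 []).foldl (stepA3 centers cells c1) s)
    (fun c1 x => ∃ node ∈ cells.getD c1 [],
          ∃ nb ∈ neighborsA node, ∃ c2 ∈ centers,
            (c2 ≠ c1 ∧ nb ∈ cells.getD c2 []) ∧ x = (min c1 c2, max c1 c2))
    (fun s c1 x => h2 c1 s x) centers PySem.Set.empty x
  simpa using h1

theorem mem_edgesA (centers : List Int) (x : Int × Int) :
    x ∈ edgesA centers ↔
      ∃ c1 ∈ centers, ∃ node ∈ (voronoi_cells centers).getD c1 [],
        ∃ nb ∈ neighborsA node, ∃ c2 ∈ centers,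
          (c2 ≠ c1 ∧ nb ∈ (voronoi_cells centers).getD c2 []) ∧ x = (min c1 c2, max c1 c2) := by
  unfold edgesA
  exact mem_edgesA_gen centers (voronoi_cells centers) x

-- bit facts on the 6-cube
theorem nb_mem_range {h i : Int} (hh : h ∈ PySem.List.pyRange 0 64 1) (hi : i ∈ PySem.List.pyRange 0 6 1) :
    nbOf h i ∈ PySem.List.pyRange 0 64 1 := by
  unfold nbOf
  rw [PySem.List.mem_pyRange_one] at hh hi ⊢
  obtain ⟨hh0, hh1⟩ := hh
  obtain ⟨hi0, hi1⟩ := hi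
  have hhn : h = ((h.toNat : Nat) : Int) := by omega
  have hlt : h.toNat < 2 ^ 6 := by omega
  have hplt : 2 ^ i.toNat < 2 ^ 6 := by
    have : i.toNat < 6 := by omega
    exact Nat.pow_lt_pow_right (by norm_num) this
  rw [shift_eq, hhn, PySem.Int.bxor_natCast]
  have hx := Nat.xor_lt_two_pow (x := h.toNat) (y := 2 ^ i.toNat) hlt hplt
  constructor
  · positivity
  · exact_mod_cast hx

theorem nbOf_cast {h : Int} (i : Int) (hh0 : 0 ≤ h) :
    nbOf h i = ((h.toNat ^^^ 2 ^ i.toNat : Nat) : Int) := by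
  unfold nbOf
  obtain ⟨m, rfl⟩ : ∃ m : Nat, h = (m : Int) := ⟨h.toNat, by omega⟩
  rw [shift_eq, PySem.Int.bxor_natCast]
  simp

theorem nbOf_nbOf {h : Int} (i : Int) (hh0 : 0 ≤ h) : nbOf (nbOf h i) i = h := by
  have h1 := nbOf_cast i hh0
  have hnn : 0 ≤ nbOf h i := by rw [h1]; positivity
  rw [nbOf_cast i hnn, h1]
  simp [Int.toNat_natCast, Nat.xor_xor_cancel_right]
  omega

theorem band_ne_zero_iff_testBit {h i : Int} (hh0 : 0 ≤ h) :
    PySem.Int.band h (Int.shiftLeft 1 i.toNat) ≠ 0 ↔ (h.toNat).testBit i.toNat = true := by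
  obtain ⟨m, rfl⟩ : ∃ m : Nat, h = (m : Int) := ⟨h.toNat, by omega⟩
  rw [shift_eq, PySem.Int.band_natCast, Int.toNat_natCast, Nat.and_two_pow]
  cases hb : m.testBit i.toNat
  · simp
  · simp only [Bool.toNat_true, one_mul, ne_eq]
    constructor
    · intro _; trivial
    · intro _ hz
      have h2 : (0:Int) < (2:Int) ^ i.toNat := by positivity
      rw [show ((2 ^ i.toNat : Nat) : Int) = (2:Int) ^ i.toNat by push_cast; ring] at hz
      omega

theorem testBit_nbOf {h : Int} (i : Int) (hh0 : 0 ≤ h) :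
    ((nbOf h i).toNat).testBit i.toNat = !(h.toNat).testBit i.toNat := by
  rw [nbOf_cast i hh0, Int.toNat_natCast, Nat.testBit_xor, Nat.testBit_two_pow_self]
  cases (h.toNat).testBit i.toNat <;> rfl

-- clearing a set bit gives a smaller node
theorem nbOf_lt {h i : Int} (hh0 : 0 ≤ h)
    (hbit : (h.toNat).testBit i.toNat = true) : 0 ≤ nbOf h i ∧ nbOf h i < h := by
  rw [nbOf_cast i hh0]
  have hlt : h.toNat ^^^ 2 ^ i.toNat < h.toNat := by
    refine Nat.lt_of_testBit i.toNat ?_ hbit ?_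
    · rw [Nat.testBit_xor, Nat.testBit_two_pow_self, hbit]
      rfl
    · intro j hj
      rw [Nat.testBit_xor, Nat.testBit_two_pow_of_ne (by omega)]
      cases (h.toNat).testBit j <;> rfl
  constructor
  · positivity
  · omega

theorem pairOf_some (a b : Int) : pairOf (some a) (some b) = pr a b := rfl

-- invariant of B's single pass after the first n nodes
theorem fold_invB (centers : List Int) (hne : centers ≠ []) :
    ∀ n : Nat, n ≤ 64 →
      (∀ v : Int,
        (((PySem.List.pyRange 0 n 1).foldl (nodeStep centers)
            (PySem.Dict.empty, PySem.Set.empty)).1).getD v none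
          = if 0 ≤ v ∧ v < (n : Int) then some (nst centers v) else none) ∧
      (∀ x : Int × Int,
        x ∈ ((PySem.List.pyRange 0 n 1).foldl (nodeStep centers)
              (PySem.Dict.empty, PySem.Set.empty)).2 ↔
          ∃ h : Int, (0 ≤ h ∧ h < (n : Int)) ∧ ∃ i ∈ PySem.List.pyRange 0 6 1,
            PySem.Int.band h (Int.shiftLeft 1 i.toNat) ≠ 0 ∧
            nst centers (nbOf h i) ≠ nst centers h ∧
            x = pr (nst centers h) (nst centers (nbOf h i))) := by
  intro n
  induction n with
  | zero =>
    intro _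
    rw [show ((0:Nat):Int) = (0:Int) by norm_num, PySem.List.pyRange_one_eq_nil (le_refl 0)]
    constructor
    · intro v
      rw [if_neg (by omega)]
      simp [PySem.Dict.getD_empty]
    · intro x
      constructor
      · intro hx; exact absurd hx (by simp [PySem.Set.empty])
      · rintro ⟨h, hb, _⟩; omega
  | succ n ih =>
    intro hle
    obtain ⟨ihD, ihM⟩ := ih (by omega)
    have hsplit : PySem.List.pyRange 0 ((n+1 : Nat) : Int) 1
        = PySem.List.pyRange 0 (n : Int) 1 ++ [(n : Int)] := by
      rw [show ((n+1:Nat):Int) = (n:Int) + 1 by push_cast; ring]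
      exact PySem.List.pyRange_one_succ_right (by positivity)
    rw [hsplit, List.foldl_append]
    generalize hst : (PySem.List.pyRange 0 (n : Int) 1).foldl (nodeStep centers)
        (PySem.Dict.empty, PySem.Set.empty) = st at ihD ihM ⊢
    simp only [List.foldl_cons, List.foldl_nil]
    have hbest : (bestOf centers (n : Int)).1 = some (nst centers (n : Int)) :=
      bestOf_eq_nst hne _
    have h1 : (nodeStep centers st (n : Int)).1
        = st.1.insert (n : Int) (bestOf centers (n : Int)).1 := rfl
    have h2 : (nodeStep centers st (n : Int)).2
        = (PySem.List.pyRange 0 6 1).foldl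
            (dimStep (bestOf centers (n : Int)).1
              (st.1.insert (n : Int) (bestOf centers (n : Int)).1) (n : Int)) st.2 := rfl
    -- the updated owner table
    have hD : ∀ v : Int,
        ((st.1.insert (n : Int) (bestOf centers (n : Int)).1).getD v none)
          = if 0 ≤ v ∧ v < ((n+1 : Nat) : Int) then some (nst centers v) else none := by
      intro v
      rw [PySem.Dict.getD_insert]
      by_cases hv : v = (n : Int)
      · subst hv
        rw [if_pos rfl, if_pos (by push_cast; omega), hbest]
      · rw [if_neg hv, ihD v]
        by_cases hc : 0 ≤ v ∧ v < (n : Int)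
        · rw [if_pos hc, if_pos (by push_cast at hc ⊢; omega)]
        · rw [if_neg hc, if_neg (by push_cast at hc ⊢; omega)]
    constructor
    · intro v
      rw [h1]
      exact hD v
    · intro x
      rw [h2]
      -- characterise the inner 6-dimension loop
      have hinner : ∀ (es : PySem.Set (Int × Int)) (x : Int × Int),
          x ∈ (PySem.List.pyRange 0 6 1).foldl
              (dimStep (bestOf centers (n : Int)).1
                (st.1.insert (n : Int) (bestOf centers (n : Int)).1) (n : Int)) es ↔
            x ∈ es ∨ ∃ i ∈ PySem.List.pyRange 0 6 1,
              PySem.Int.band (n : Int) (Int.shiftLeft 1 i.toNat) ≠ 0 ∧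
              ((st.1.insert (n : Int) (bestOf centers (n : Int)).1).getD
                  (PySem.Int.bxor (n : Int) (Int.shiftLeft 1 i.toNat)) none
                ≠ (bestOf centers (n : Int)).1) ∧
              x = pairOf (bestOf centers (n : Int)).1
                  ((st.1.insert (n : Int) (bestOf centers (n : Int)).1).getD
                    (PySem.Int.bxor (n : Int) (Int.shiftLeft 1 i.toNat)) none) := by
        intro es x
        refine mem_foldl_iff _
          (fun (i : Int) (x : Int × Int) =>
            PySem.Int.band (n : Int) (Int.shiftLeft 1 i.toNat) ≠ 0 ∧
            ((st.1.insert (n : Int) (bestOf centers (n : Int)).1).getD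
                (PySem.Int.bxor (n : Int) (Int.shiftLeft 1 i.toNat)) none
              ≠ (bestOf centers (n : Int)).1) ∧
            x = pairOf (bestOf centers (n : Int)).1
                ((st.1.insert (n : Int) (bestOf centers (n : Int)).1).getD
                  (PySem.Int.bxor (n : Int) (Int.shiftLeft 1 i.toNat)) none))
          (fun es i x => ?_) _ es x
        unfold dimStep
        by_cases hb1 : PySem.Int.band (n : Int) (Int.shiftLeft 1 i.toNat) ≠ 0
        · rw [if_pos hb1]
          by_cases hb2 : (st.1.insert (n : Int) (bestOf centers (n : Int)).1).getD
              (PySem.Int.bxor (n : Int) (Int.shiftLeft 1 i.toNat)) none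
              ≠ (bestOf centers (n : Int)).1
          · rw [if_pos hb2, PySem.Set.mem_add]
            tauto
          · rw [if_neg hb2]
            tauto
        · rw [if_neg hb1]
          tauto
      rw [hinner, ihM x]
      -- rewrite the lookup of a lower neighbour as its nearest center
      have hlook : ∀ i : Int, i ∈ PySem.List.pyRange 0 6 1 →
          PySem.Int.band (n : Int) (Int.shiftLeft 1 i.toNat) ≠ 0 →
          (st.1.insert (n : Int) (bestOf centers (n : Int)).1).getD
              (PySem.Int.bxor (n : Int) (Int.shiftLeft 1 i.toNat)) none
            = some (nst centers (nbOf (n : Int) i)) := by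
        intro i _ hband
        have hbit := (band_ne_zero_iff_testBit (by positivity)).mp hband
        have hlt := nbOf_lt (h := (n : Int)) (i := i) (by positivity) hbit
        have hnb : PySem.Int.bxor (n : Int) (Int.shiftLeft 1 i.toNat) = nbOf (n : Int) i := rfl
        rw [hnb, hD (nbOf (n : Int) i), if_pos (by push_cast; omega)]
      constructor
      · rintro (⟨h, hb, rest⟩ | ⟨i, hi, hband, hne2, hx⟩)
        · exact ⟨h, ⟨hb.1, by push_cast at hb ⊢; omega⟩, rest⟩
        · refine ⟨(n : Int), ⟨by positivity, by push_cast; omega⟩, i, hi, hband, ?_, ?_⟩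
          · rw [hlook i hi hband, hbest] at hne2
            exact fun he => hne2 (by rw [he])
          · rw [hlook i hi hband, hbest] at hx
            rw [hx, pairOf_some]
      · rintro ⟨h, hb, i, hi, hband, hne2, hx⟩
        by_cases hh : h < (n : Int)
        · exact Or.inl ⟨h, ⟨hb.1, hh⟩, i, hi, hband, hne2, hx⟩
        · have : h = (n : Int) := by push_cast at hb; omega
          subst this
          refine Or.inr ⟨i, hi, hband, ?_, ?_⟩
          · rw [hlook i hi hband, hbest]
            exact fun he => hne2 (Option.some.inj he)
          · rw [hlook i hi hband, hbest, pairOf_some]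
            exact hx

theorem mem_edgesB (centers : List Int) (hne : centers ≠ []) (x : Int × Int) :
    x ∈ edgesB centers ↔
      ∃ h ∈ PySem.List.pyRange 0 64 1, ∃ i ∈ PySem.List.pyRange 0 6 1,
        PySem.Int.band h (Int.shiftLeft 1 i.toNat) ≠ 0 ∧
        nst centers (nbOf h i) ≠ nst centers h ∧
        x = pr (nst centers h) (nst centers (nbOf h i)) := by
  unfold edgesB
  have h64 := (fold_invB centers hne 64 (by norm_num)).2 x
  push_cast at h64
  rw [h64]
  constructor
  · rintro ⟨h, hb, rest⟩
    exact ⟨h, (PySem.List.mem_pyRange_one).mpr ⟨hb.1, by exact_mod_cast hb.2⟩, rest⟩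
  · rintro ⟨h, hb, rest⟩
    have := (PySem.List.mem_pyRange_one).mp hb
    exact ⟨h, ⟨this.1, by exact_mod_cast this.2⟩, rest⟩

-- the two edge sets have the same members
theorem edges_mem_iff (centers : List Int) (hne : centers ≠ []) (x : Int × Int) :
    x ∈ edgesA centers ↔ x ∈ edgesB centers := by
  rw [mem_edgesA, mem_edgesB centers hne]
  constructor
  · rintro ⟨c1, hc1, node, hnode, nb, hnb, c2, hc2, ⟨hneq, hnbcell⟩, rfl⟩
    rw [mem_cells] at hnode hnbcell
    obtain ⟨hnr, hno⟩ := hnode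
    obtain ⟨hbr, hbo⟩ := hnbcell
    unfold neighborsA at hnb
    simp only [List.mem_map] at hnb
    obtain ⟨i, hi, rfl⟩ := hnb
    have hnb0 : PySem.Int.bxor node (Int.shiftLeft 1 i.toNat) = nbOf node i := rfl
    rw [hnb0] at hbo hbr
    have hn0 : (0:Int) ≤ node := ((PySem.List.mem_pyRange_one).mp hnr).1
    have hdiff : nst centers (nbOf node i) ≠ nst centers node := by
      rw [hno, hbo]; exact fun he => hneq (he.symm ▸ rfl)
    by_cases hbit : (node.toNat).testBit i.toNat = true
    · refine ⟨node, hnr, i, hi, (band_ne_zero_iff_testBit hn0).mpr hbit, hdiff, ?_⟩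
      rw [hno, hbo, pr_minmax]
    · -- the other endpoint carries the set bit
      have hb0 : (0:Int) ≤ nbOf node i := ((PySem.List.mem_pyRange_one).mp hbr).1
      have hbit' : ((nbOf node i).toNat).testBit i.toNat = true := by
        rw [testBit_nbOf i hn0]
        simp [Bool.not_eq_true] at hbit
        rw [hbit]; rfl
      refine ⟨nbOf node i, hbr, i, hi, (band_ne_zero_iff_testBit hb0).mpr hbit', ?_, ?_⟩
      · rw [nbOf_nbOf i hn0, hno, hbo]
        exact fun he => hneq (he ▸ rfl)
      · rw [nbOf_nbOf i hn0, hno, hbo, pr_comm, pr_minmax]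
  · rintro ⟨h, hh, i, hi, hband, hdiff, rfl⟩
    have hbr : nbOf h i ∈ PySem.List.pyRange 0 64 1 := nb_mem_range hh hi
    refine ⟨nst centers h, nst_mem hne h, h, ?_, nbOf h i, ?_,
            nst centers (nbOf h i), nst_mem hne _, ⟨fun he => hdiff (by rw [he]), ?_⟩, ?_⟩
    · rw [mem_cells]; exact ⟨hh, rfl⟩
    · unfold neighborsA
      simp only [List.mem_map]
      exact ⟨i, hi, rfl⟩
    · rw [mem_cells]; exact ⟨hbr, rfl⟩
    · rw [pr_minmax]

theorem nodup_edgesA (centers : List Int) : (edgesA centers).Nodup := by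
  have gen : ∀ (cells : PySem.Dict Int (List Int)),
      (centers.foldl
        (fun s c1 => (cells.getD c1 []).foldl (stepA3 centers cells c1) s) PySem.Set.empty).Nodup := by
    intro cells
    refine nodup_foldl _ (fun s c1 hs => ?_) centers PySem.Set.empty (List.nodup_nil)
    refine nodup_foldl _ (fun s node hs => ?_) _ s hs
    unfold stepA3
    refine nodup_foldl _ (fun s nb hs => ?_) _ s hs
    refine nodup_foldl _ (fun s c2 hs => ?_) _ s hs
    unfold stepA4
    by_cases hc : c2 ≠ c1 ∧ nb ∈ cells.getD c2 []
    · rw [if_pos hc]; exact PySem.Set.nodup_add _ _ hs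
    · rw [if_neg hc]; exact hs
  exact gen (voronoi_cells centers)

theorem nodup_edgesB (centers : List Int) : (edgesB centers).Nodup := by
  unfold edgesB
  have gen : ∀ (l : List Int) (st : PySem.Dict Int (Option Int) × PySem.Set (Int × Int)),
      st.2.Nodup → ((l.foldl (nodeStep centers) st).2).Nodup := by
    intro l
    induction l with
    | nil => intro st hs; simpa using hs
    | cons a t ih =>
      intro st hs
      refine ih _ ?_
      show (((PySem.List.pyRange 0 6 1)).foldl
          (dimStep (bestOf centers a).1 (st.1.insert a (bestOf centers a).1) a) st.2).Nodup
      refine nodup_foldl _ (fun s i hsn => ?_) _ st.2 hs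
      unfold dimStep
      by_cases h1 : PySem.Int.band a (Int.shiftLeft 1 i.toNat) ≠ 0
      · rw [if_pos h1]
        by_cases h2 : (st.1.insert a (bestOf centers a).1).getD (PySem.Int.bxor a (Int.shiftLeft 1 i.toNat)) none ≠ (bestOf centers a).1
        · rw [if_pos h2]; exact PySem.Set.nodup_add _ _ hsn
        · rw [if_neg h2]; exact hsn
      · rw [if_neg h1]; exact hsn
  exact gen _ _ (List.nodup_nil)

-- lexicographic ≤ on pairs, and sortedness of sorted2's output with respect to it
def LexLe (a b : Int × Int) : Prop := a.1 < b.1 ∨ (a.1 = b.1 ∧ a.2 ≤ b.2)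

def lexLtB (a b : Int × Int) : Bool :=
  decide (a.1 < b.1) || (!decide (b.1 < a.1) && decide (a.2 < b.2))

theorem pairwise_insertBy (x : Int × Int) (acc : List (Int × Int))
    (h : acc.Pairwise LexLe) : (PySem.List.insertBy lexLtB x acc).Pairwise LexLe := by
  induction acc with
  | nil => simp [PySem.List.insertBy]
  | cons y ys ih =>
    rw [List.pairwise_cons] at h
    obtain ⟨hy, hys⟩ := h
    by_cases hb : lexLtB x y = true
    · have hxy : LexLe x y := by
        unfold lexLtB at hb
        unfold LexLe
        simp only [Bool.or_eq_true, Bool.and_eq_true, Bool.not_eq_eq_eq_not, Bool.not_true,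
          decide_eq_true_eq, decide_eq_false_iff_not] at hb
        omega
      have : PySem.List.insertBy lexLtB x (y :: ys) = x :: y :: ys := by
        simp [PySem.List.insertBy, hb]
      rw [this]
      refine List.pairwise_cons.mpr ⟨?_, List.pairwise_cons.mpr ⟨hy, hys⟩⟩
      intro z hz
      rcases List.mem_cons.mp hz with rfl | hz
      · exact hxy
      · have := hy z hz
        unfold LexLe at hxy this ⊢
        omega
    · have hyx : LexLe y x := by
        unfold lexLtB at hb
        unfold LexLe
        simp only [Bool.or_eq_true, Bool.and_eq_true, Bool.not_eq_eq_eq_not, Bool.not_true,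
          decide_eq_true_eq, decide_eq_false_iff_not] at hb
        omega
      have : PySem.List.insertBy lexLtB x (y :: ys) = y :: PySem.List.insertBy lexLtB x ys := by
        simp [PySem.List.insertBy, hb]
      rw [this]
      refine List.pairwise_cons.mpr ⟨?_, ih hys⟩
      intro z hz
      rcases (PySem.List.mem_insertBy _ _ _ _).mp hz with rfl | hz
      · exact hyx
      · exact hy z hz

theorem pairwise_foldl_insertBy (xs : List (Int × Int)) :
    ∀ acc, acc.Pairwise LexLe →
      (xs.foldl (fun acc x => PySem.List.insertBy lexLtB x acc) acc).Pairwise LexLe := by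
  induction xs with
  | nil => intro acc h; simpa using h
  | cons x t ih => intro acc h; exact ih _ (pairwise_insertBy x acc h)

theorem sorted2_eq_foldl (xs : List (Int × Int)) :
    PySem.List.sorted2 xs (fun p => p.1) (fun p => p.2) false
      = xs.foldl (fun acc x => PySem.List.insertBy lexLtB x acc) [] := rfl

theorem pairwise_sorted2 (xs : List (Int × Int)) :
    (PySem.List.sorted2 xs (fun p => p.1) (fun p => p.2) false).Pairwise LexLe := by
  rw [sorted2_eq_foldl]
  exact pairwise_foldl_insertBy xs [] (List.Pairwise.nil)

theorem sorted2_eq_of_perm {xs ys : List (Int × Int)} (hp : xs.Perm ys) :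
    PySem.List.sorted2 xs (fun p => p.1) (fun p => p.2) false
      = PySem.List.sorted2 ys (fun p => p.1) (fun p => p.2) false := by
  have p1 := PySem.List.sorted2_perm xs (fun p : Int × Int => p.1) (fun p => p.2) false
  have p2 := PySem.List.sorted2_perm ys (fun p : Int × Int => p.1) (fun p => p.2) false
  have hperm := (p1.trans hp).trans p2.symm
  refine List.Perm.eq_of_pairwise (fun a b _ _ hab hba => ?_)
    (pairwise_sorted2 xs) (pairwise_sorted2 ys) hperm
  unfold LexLe at hab hba
  obtain ⟨a1, a2⟩ := a
  obtain ⟨b1, b2⟩ := b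
  simp only [Prod.mk.injEq]
  constructor <;> omega

-- ===== VERDICT (by name: the statement is the Claim_ definition above) =====
theorem delaunay_graph_spec : Claim_equal_delaunay_graph := by
  intro centers _ hpre
  unfold Spec_delaunay_graph delaunay_graph delaunay_graph_alt
  refine sorted2_eq_of_perm ?_
  rw [List.perm_ext_iff_of_nodup (nodup_edgesA centers) (nodup_edgesB centers)]
  exact edges_mem_iff centers hpre
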